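-- pv_equiv track=rewrite | github.com/iravnil5765/sports-bot | injuries.py | format_injury_alert
-- ===== SOURCE A (Python) =====
-- def format_injury_alert(injuries):
--     """Format injuries into a short alert string."""
--     if not injuries:
--         return None
--     out      = [i for i in injuries if i['status'].upper() == 'OUT']
--     doubtful = [i for i in injuries if i['status'].upper() == 'DOUBTFUL']
--     lines    = []
--     if out:
--         names = ', '.join(i['player'] for i in out[:3])
--         lines.append(f"❌ OUT: {names}")
--     if doubtful:
--         names = ', '.join(i['player'] for i in doubtful[:2])
--         lines.append(f"⚠️ DOUBTFUL: {names}")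
--     return ' | '.join(lines) if lines else None
-- ===== SOURCE B (Python) =====
-- def format_injury_alert(injuries):
--     """Format injuries into a short alert string."""
--     if not injuries:
--         return None
--     # single pass: keep only the bounded name lists actually printed, plus presence flags
--     out_names, doubt_names = [], []
--     has_out = has_doubt = False
--     for i in injuries:
--         s = i['status'].upper()
--         if s == 'OUT':
--             has_out = True
--             if len(out_names) < 3:
--                 out_names.append(i['player'])
--         elif s == 'DOUBTFUL':
--             has_doubt = True
--             if len(doubt_names) < 2:
--                 doubt_names.append(i['player'])
--     lines = []
--     if has_out:
--         lines.append("❌ OUT: " + ', '.join(out_names))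
--     if has_doubt:
--         lines.append("⚠️ DOUBTFUL: " + ', '.join(doubt_names))
--     return ' | '.join(lines) if lines else None
-- ===== Notes on version B (the rewrite author's own statement) =====
-- stated objective: alternative
-- what changed: B makes a single pass keeping only bounded accumulators (the at-most-3 OUT and at-most-2 DOUBTFUL player names actually printed, plus two presence flags) instead of A's two whole-list filters that materialise every matching item before truncating.
import Mathlib
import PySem

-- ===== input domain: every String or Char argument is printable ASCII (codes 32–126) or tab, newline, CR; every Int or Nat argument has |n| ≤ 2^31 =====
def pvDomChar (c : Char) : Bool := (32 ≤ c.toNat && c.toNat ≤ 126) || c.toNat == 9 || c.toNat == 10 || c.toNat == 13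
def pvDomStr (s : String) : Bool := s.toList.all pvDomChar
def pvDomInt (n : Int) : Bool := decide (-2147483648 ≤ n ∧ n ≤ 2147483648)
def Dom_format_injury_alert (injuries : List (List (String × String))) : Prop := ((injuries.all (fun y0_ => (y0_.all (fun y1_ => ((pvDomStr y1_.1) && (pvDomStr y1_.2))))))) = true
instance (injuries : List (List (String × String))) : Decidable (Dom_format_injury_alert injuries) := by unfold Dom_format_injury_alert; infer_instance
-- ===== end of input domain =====

-- B is a single pass with bounded accumulators (the ≤3/≤2 printed names plus presence flags)
-- instead of A's two whole-list filters; return values agree on Pre_.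

-- shared helper: first-match lookup in an association-list dict; Python's i[k] raises KeyError when none
def pvDget (d : List (String × String)) (k : String) : Option String :=
  (d.find? (fun p => p.1 == k)).map (·.2)

-- i['status'] / i['player'], with a dummy "" where Python would raise (such inputs are outside Pre_)
def pvStatus (i : List (String × String)) : String := (pvDget i "status").getD ""
def pvPlayer (i : List (String × String)) : String := (pvDget i "player").getD ""

-- ===== PORT A =====
def format_injury_alert (injuries : List (List (String × String))) : Option String :=
  if injuries = [] then none
  else
    let out := injuries.filter (fun i => PySem.Str.upper (pvStatus i) == "OUT")
    let doubtful := injuries.filter (fun i => PySem.Str.upper (pvStatus i) == "DOUBTFUL")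
    let lines : List String := []
    let lines := if out ≠ [] then
        lines ++ ["❌ OUT: " ++ PySem.Str.join ", " ((out.take 3).map pvPlayer)]
      else lines
    let lines := if doubtful ≠ [] then
        lines ++ ["⚠️ DOUBTFUL: " ++ PySem.Str.join ", " ((doubtful.take 2).map pvPlayer)]
      else lines
    if lines ≠ [] then some (PySem.Str.join " | " lines) else none

-- ===== PORT B =====
-- loop body of B: state = (out_names, has_out, doubt_names, has_doubt)
def pvStep (st : List String × Bool × List String × Bool) (i : List (String × String)) :
    List String × Bool × List String × Bool :=
  let s := PySem.Str.upper (pvStatus i)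
  if s == "OUT" then
    ((if st.1.length < 3 then st.1 ++ [pvPlayer i] else st.1), true, st.2.2.1, st.2.2.2)
  else if s == "DOUBTFUL" then
    (st.1, st.2.1, (if st.2.2.1.length < 2 then st.2.2.1 ++ [pvPlayer i] else st.2.2.1), true)
  else st

def format_injury_alert_alt (injuries : List (List (String × String))) : Option String :=
  if injuries = [] then none
  else
    let st := injuries.foldl pvStep ([], false, [], false)
    let lines : List String := []
    let lines := if st.2.1 then
        lines ++ ["❌ OUT: " ++ PySem.Str.join ", " st.1]
      else lines
    let lines := if st.2.2.2 then
        lines ++ ["⚠️ DOUBTFUL: " ++ PySem.Str.join ", " st.2.2.1]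
      else lines
    if lines ≠ [] then some (PySem.Str.join " | " lines) else none

-- ===== PRECONDITION & SPEC =====
-- Pre_ excludes exactly the inputs where the Python raises KeyError: some entry lacks a 'status'
-- key, or one of the entries whose players are printed (first 3 OUT / first 2 DOUBTFUL) lacks 'player'.
def Pre_format_injury_alert (injuries : List (List (String × String))) : Prop :=
  (∀ i ∈ injuries, (pvDget i "status").isSome = true) ∧
  (∀ i ∈ (injuries.filter (fun i => (pvStatus i).toList.map Char.toUpper == "OUT".toList)).take 3,
      (pvDget i "player").isSome = true) ∧
  (∀ i ∈ (injuries.filter (fun i => (pvStatus i).toList.map Char.toUpper == "DOUBTFUL".toList)).take 2,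
      (pvDget i "player").isSome = true)
instance (injuries : List (List (String × String))) : Decidable (Pre_format_injury_alert injuries) := by
  unfold Pre_format_injury_alert; infer_instance

def pvWitness_format_injury_alert : (List (List (String × String))) :=
  [[("status", "OUT"), ("player", "A. Smith")], [("status", "Doubtful"), ("player", "B. Jones")]]

def Spec_format_injury_alert (injuries : List (List (String × String))) (out : Option String) : Prop := out = format_injury_alert_alt injuries
instance (injuries : List (List (String × String))) (out : Option String) : Decidable (Spec_format_injury_alert injuries out) := by unfold Spec_format_injury_alert; infer_instance

-- ===== CLAIM =====
def Claim_equal_format_injury_alert : Prop := ∀ (injuries : List (List (String × String))), Dom_format_injury_alert injuries → Pre_format_injury_alert injuries → Spec_format_injury_alert injuries (format_injury_alert injuries)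

-- ===== LEMMAS AND PROOFS =====

-- fold invariant: the accumulators hold the (bounded) filtered names and the flags record nonemptiness
theorem pvStep_fold_inv (l : List (List (String × String)))
    (o : List String) (ho : Bool) (d : List String) (hd : Bool) :
    l.foldl pvStep (o, ho, d, hd) =
      ( o ++ (((l.filter (fun i => PySem.Str.upper (pvStatus i) == "OUT")).take (3 - o.length)).map pvPlayer),
        ho || !((l.filter (fun i => PySem.Str.upper (pvStatus i) == "OUT")).isEmpty),
        d ++ (((l.filter (fun i => PySem.Str.upper (pvStatus i) == "DOUBTFUL")).take (2 - d.length)).map pvPlayer),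
        hd || !((l.filter (fun i => PySem.Str.upper (pvStatus i) == "DOUBTFUL")).isEmpty) ) := by
  induction l generalizing o ho d hd with
  | nil => simp
  | cons x xs ih =>
    simp only [List.foldl_cons, List.filter_cons]
    by_cases hOut : PySem.Str.upper (pvStatus x) = "OUT"
    · have hNotD : (PySem.Str.upper (pvStatus x) == "DOUBTFUL") = false := by
        simp [hOut]
      simp only [pvStep, hOut]
      rw [ih]
      by_cases hlen : o.length < 3
      · have h3 : 3 - o.length = (3 - (o.length + 1)) + 1 := by omega
        simp [hlen, h3, List.take_succ_cons]
      · have h0 : 3 - o.length = 0 := by omega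
        have h0' : 3 - (o.length) = 0 := h0
        simp [hlen, h0]
    · by_cases hD : PySem.Str.upper (pvStatus x) = "DOUBTFUL"
      · simp only [pvStep, hD]
        rw [ih]
        by_cases hlen : d.length < 2
        · have h2 : 2 - d.length = (2 - (d.length + 1)) + 1 := by omega
          simp [hlen, h2, List.take_succ_cons]
        · have h0 : 2 - d.length = 0 := by omega
          simp [hlen, h0]
      · have hb1 : (PySem.Str.upper (pvStatus x) == "OUT") = false := by simp [hOut]
        have hb2 : (PySem.Str.upper (pvStatus x) == "DOUBTFUL") = false := by simp [hD]
        simp only [pvStep, hb1, hb2]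
        rw [ih]
        simp

-- ===== VERDICT =====
theorem format_injury_alert_spec : Claim_equal_format_injury_alert := by
  intro injuries _ _
  unfold Spec_format_injury_alert format_injury_alert format_injury_alert_alt
  by_cases h : injuries = []
  · simp [h]
  · simp only [h, if_false]
    rw [pvStep_fold_inv]
    simp
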